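-- pv_equiv track=rewrite | github.com/MrPoteete/automotive-diagnostic-skills | src/diagnostic/confidence_scorer.py | _dtc_matches_component
-- ===== SOURCE A (Python) =====
-- _DTC_COMPONENT_MAP: dict[str, list[str]] = {
--     "P": ["power train", "engine", "fuel", "ignition", "exhaust"],
--     "C": ["chassis", "brake", "suspension", "steering", "traction"],
--     "B": ["body", "airbag", "srs", "climate", "electrical"],
--     "U": ["network", "communication", "electrical", "module"],
-- }
--
-- def _dtc_matches_component(dtc_codes: list[str], component: str) -> bool:
--     """Return True if any DTC code's system prefix maps to the component."""
--     if not dtc_codes: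
--         return False
--     component_lower = component.lower()
--     for code in dtc_codes:
--         if not code:
--             continue
--         prefix = code[0].upper()
--         keywords = _DTC_COMPONENT_MAP.get(prefix, [])
--         if any(kw in component_lower for kw in keywords):
--             return True
--     return False
-- ===== SOURCE B (Python) =====
-- _DTC_COMPONENT_MAP: dict[str, list[str]] = {
--     "P": ["power train", "engine", "fuel", "ignition", "exhaust"],
--     "C": ["chassis", "brake", "suspension", "steering", "traction"],
--     "B": ["body", "airbag", "srs", "climate", "electrical"],
--     "U": ["network", "communication", "electrical", "module"],
-- }
--
-- def _dtc_matches_component(dtc_codes: list[str], component: str) -> bool: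
--     """Return True if any DTC code's system prefix maps to the component."""
--     component_lower = component.lower()
--     prefixes = {
--         p for p, kws in _DTC_COMPONENT_MAP.items()
--         if any(kw in component_lower for kw in kws)
--     }
--     return any(code and code[0].upper() in prefixes for code in dtc_codes)
-- ===== Notes on version B (the rewrite author's own statement) =====
-- stated objective: faster
-- what changed: B inverts the nesting: it scans the keyword map once to precompute the set of DTC prefixes whose keywords occur in the lowered component, then answers with a single set-membership pass over the codes; A re-scans a keyword list (substring searches) for every code.
import Mathlib
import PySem

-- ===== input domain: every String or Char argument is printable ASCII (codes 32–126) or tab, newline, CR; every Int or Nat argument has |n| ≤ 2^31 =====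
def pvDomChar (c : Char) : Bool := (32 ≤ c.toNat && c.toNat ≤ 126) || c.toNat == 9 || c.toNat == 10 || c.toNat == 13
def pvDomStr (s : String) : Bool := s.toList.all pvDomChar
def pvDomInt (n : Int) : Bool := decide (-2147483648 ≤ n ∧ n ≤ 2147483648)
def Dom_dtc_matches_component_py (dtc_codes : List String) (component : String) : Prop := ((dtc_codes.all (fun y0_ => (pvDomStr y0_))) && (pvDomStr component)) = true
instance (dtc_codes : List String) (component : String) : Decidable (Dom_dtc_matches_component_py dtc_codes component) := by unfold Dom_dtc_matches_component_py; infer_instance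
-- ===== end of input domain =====

-- B inverts the nesting: it first builds the set of DTC prefixes whose keywords occur in the
-- lowered component, then answers with one membership pass over the codes ("alternative").

-- module-level constant _DTC_COMPONENT_MAP (its entry list, shared by both ports)
def pvDtcEntries : List (String × List String) :=
  [("P", ["power train", "engine", "fuel", "ignition", "exhaust"]),
   ("C", ["chassis", "brake", "suspension", "steering", "traction"]),
   ("B", ["body", "airbag", "srs", "climate", "electrical"]),
   ("U", ["network", "communication", "electrical", "module"])]

-- ===== PORT A =====
def pvDtcMap : PySem.Dict String (List String) := PySem.Dict.ofList pvDtcEntries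

-- A's for-loop with early 'return True'; 'if not code: continue' and 'code[0]' via code.toList
def dtcLoopA (cl : String) : List String → Bool
  | [] => false
  | code :: rest =>
    match code.toList with
    | [] => dtcLoopA cl rest
    | c :: _ =>
      let keywords := PySem.Dict.getD pvDtcMap (String.ofList [PySem.Chars.upperChar c]) []
      if keywords.any (fun kw => PySem.Str.isIn kw cl) then true else dtcLoopA cl rest

def dtc_matches_component_py (dtc_codes : List String) (component : String) : Bool :=
  if dtc_codes = [] then false
  else dtcLoopA (PySem.Str.lower component) dtc_codes

-- ===== PORT B =====
def dtc_matches_component_py_alt (dtc_codes : List String) (component : String) : Bool :=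
  let cl := PySem.Str.lower component
  let prefixes : PySem.Set String :=
    pvDtcEntries.foldl
      (fun s pk => if pk.2.any (fun kw => PySem.Str.isIn kw cl) then PySem.Set.add s pk.1 else s)
      PySem.Set.empty
  dtc_codes.any (fun code =>
    match code.toList with
    | [] => false
    | c :: _ => PySem.Set.contains prefixes (String.ofList [PySem.Chars.upperChar c]))

-- ===== PRECONDITION & SPEC =====
def Spec_dtc_matches_component_py (dtc_codes : List String) (component : String) (out : Bool) : Prop := out = dtc_matches_component_py_alt dtc_codes component
instance (dtc_codes : List String) (component : String) (out : Bool) : Decidable (Spec_dtc_matches_component_py dtc_codes component out) := by unfold Spec_dtc_matches_component_py; infer_instance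

-- ===== CLAIM (what is proved, stated in full; the proofs are below) =====
def Claim_equal_dtc_matches_component_py : Prop := ∀ (dtc_codes : List String) (component : String), Dom_dtc_matches_component_py dtc_codes component → Spec_dtc_matches_component_py dtc_codes component (dtc_matches_component_py dtc_codes component)

-- ===== LEMMAS AND PROOFS =====

lemma contains_add (s : PySem.Set String) (x q : String) :
    PySem.Set.contains (PySem.Set.add s x) q = (PySem.Set.contains s q || (x == q)) := by
  rw [Bool.eq_iff_iff]
  simp only [Bool.or_eq_true, PySem.Set.contains_iff, beq_iff_eq, PySem.Set.mem_add]
  tauto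

-- B's conditional-add fold over the entries, characterised pointwise
lemma contains_foldl_condAdd (cl : String) (l : List (String × List String))
    (s : PySem.Set String) (q : String) :
    PySem.Set.contains
      (l.foldl (fun s pk => if pk.2.any (fun kw => PySem.Str.isIn kw cl) then PySem.Set.add s pk.1 else s) s) q
      = (PySem.Set.contains s q
          || l.any (fun pk => pk.2.any (fun kw => PySem.Str.isIn kw cl) && (pk.1 == q))) := by
  induction l generalizing s with
  | nil => simp
  | cons e l ih =>
    simp only [List.foldl_cons, List.any_cons]
    rw [ih]
    by_cases hp : (e.2.any fun kw => PySem.Str.isIn kw cl) = true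
    · rw [if_pos hp, contains_add, hp]
      simp only [Bool.true_and, Bool.or_assoc]
    · rw [if_neg hp]
      rw [Bool.not_eq_true] at hp
      simp only [hp, Bool.false_and, Bool.false_or]

-- B's precomputed set answers exactly A's per-prefix keyword test
lemma contains_prefixes (cl q : String) :
    PySem.Set.contains
      (pvDtcEntries.foldl
        (fun s pk => if pk.2.any (fun kw => PySem.Str.isIn kw cl) then PySem.Set.add s pk.1 else s)
        PySem.Set.empty) q
      = (PySem.Dict.getD pvDtcMap q []).any (fun kw => PySem.Str.isIn kw cl) := by
  have hmap : pvDtcMap = PySem.Dict.mk pvDtcEntries := rfl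
  rw [hmap, contains_foldl_condAdd]
  simp only [pvDtcEntries, List.any_cons, List.any_nil,
    PySem.Dict.getD_eq_get?_getD, PySem.Dict.get?_mk_cons]
  by_cases h1 : "P" = q
  · subst h1; simp
  by_cases h2 : "C" = q
  · subst h2; simp
  by_cases h3 : "B" = q
  · subst h3; simp
  by_cases h4 : "U" = q
  · subst h4; simp
  simp [PySem.Dict.get?, h1, h2, h3, h4]

lemma loop_eq (cl : String) (codes : List String) :
    dtcLoopA cl codes
      = codes.any (fun code =>
          match code.toList with
          | [] => false
          | c :: _ =>
            PySem.Set.contains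
              (pvDtcEntries.foldl
                (fun s pk => if pk.2.any (fun kw => PySem.Str.isIn kw cl) then PySem.Set.add s pk.1 else s)
                PySem.Set.empty)
              (String.ofList [PySem.Chars.upperChar c])) := by
  induction codes with
  | nil => simp [dtcLoopA]
  | cons code rest ih =>
    simp only [dtcLoopA, List.any_cons]
    cases h : code.toList with
    | nil => simp [ih]
    | cons c cs =>
      dsimp only
      rw [ih, contains_prefixes]
      cases hk : ((PySem.Dict.getD pvDtcMap (String.ofList [PySem.Chars.upperChar c]) []).any
          (fun kw => PySem.Str.isIn kw cl)) <;> simp_all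

-- ===== VERDICT (by name: the statement is the Claim_ definition above) =====
theorem dtc_matches_component_py_spec : Claim_equal_dtc_matches_component_py := by
  intro dtc_codes component _
  unfold Spec_dtc_matches_component_py dtc_matches_component_py dtc_matches_component_py_alt
  by_cases h : dtc_codes = []
  · subst h; simp
  · simp only [h, if_false]
    exact loop_eq _ _
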